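-- pv_equiv track=rewrite | github.com/Kristjamar/Paragraph-Analysis | paragraph_analysis.py | makeLists
-- ===== SOURCE A (Python) =====
-- import string
--
-- def makeLists(file_object):
--     '''
--         Creation of lists from the object_file.
--         First a list of paragraphs is created.
--         Then a list of all the words in the data file.
--     '''
--     paragraphs = []
--     cleandpara = []
--     para = []
--     newlist = []
--     nlist = []
--
--     for line in file_object:
--         paragraphs = paragraphs + line.split()
--         newlist = newlist + line.split()
--         if line == "\n":
--             para.append(paragraphs)
--             paragraphs = []
--
--     para.append(paragraphs)
--     paragraphs = []
--
--     for ob in para: #'Ob' resembles a whole paragraph, for lack of a better word.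
--         for word in ob:
--             word = word.lower()
--             word = word.strip()
--             word = word.strip(string.punctuation)
--             paragraphs.append(word)
--         cleandpara.append(paragraphs)
--         paragraphs = []
--
--     for word in newlist:
--         word = word.lower()
--         word = word.strip()
--         word = word.strip(string.punctuation)
--         nlist.append(word)
--
--     return nlist, cleandpara
-- ===== SOURCE B (Python) =====
-- import string
--
-- def makeLists(file_object):
--     # Split the line list on "\n" delimiter lines (like str.split), then clean
--     # each chunk's words in one comprehension; the flat list is the flattening.
--     lines = list(file_object)
--     chunks = []
--     while "\n" in lines:
--         i = lines.index("\n")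
--         chunks.append(lines[:i])
--         lines = lines[i + 1:]
--     chunks.append(lines)
--     cleandpara = [[w.lower().strip().strip(string.punctuation)
--                    for line in chunk for w in line.split()]
--                   for chunk in chunks]
--     nlist = [w for p in cleandpara for w in p]
--     return nlist, cleandpara
-- ===== Notes on version B (the rewrite author's own statement) =====
-- stated objective: faster
-- what changed: B replaces A's per-line state machine and its three accumulator passes by a str.split-style delimiter split of the line list (index + slicing on "\n" lines), cleans each chunk's words in a single comprehension, and derives the flat word list by flattening the cleaned paragraphs, eliminating A's separate newlist accumulator and its quadratic 'list + list' rebuilds.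
import Mathlib
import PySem

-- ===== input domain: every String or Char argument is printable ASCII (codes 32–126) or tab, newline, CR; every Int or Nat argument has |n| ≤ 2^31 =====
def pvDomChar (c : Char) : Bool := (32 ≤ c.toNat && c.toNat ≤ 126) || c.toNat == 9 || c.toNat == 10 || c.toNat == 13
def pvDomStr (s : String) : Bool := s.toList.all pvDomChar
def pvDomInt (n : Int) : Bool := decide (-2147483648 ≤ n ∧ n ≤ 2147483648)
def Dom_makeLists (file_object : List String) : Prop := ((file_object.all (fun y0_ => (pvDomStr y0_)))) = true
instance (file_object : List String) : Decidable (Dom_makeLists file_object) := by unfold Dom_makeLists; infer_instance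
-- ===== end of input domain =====

-- B splits the line list on "\n" delimiter lines (index + slicing, like str.split) instead of
-- A's per-line state machine, cleans each chunk in one comprehension, and derives the flat word
-- list by flattening the cleaned paragraphs, dropping A's separate newlist accumulator and pass.

-- string.punctuation
def pvPunct : String := "!\"#$%&'()*+,-./:;<=>?@[\\]^_`{|}~"

-- word.lower(); word.strip(); word.strip(string.punctuation)
def pvClean (w : String) : String :=
  PySem.Str.stripChars (PySem.Str.strip (PySem.Str.lower w)) pvPunct

-- ===== PORT A =====
def makeLists (file_object : List String) : List String × List (List String) :=
  -- first loop: state = (paragraphs, newlist, para)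
  let st := file_object.foldl
    (fun (st : List String × List String × List (List String)) line =>
      let paragraphs := st.1 ++ PySem.Str.split₀ line
      let newlist := st.2.1 ++ PySem.Str.split₀ line
      if line == "\n" then ([], newlist, st.2.2 ++ [paragraphs])
      else (paragraphs, newlist, st.2.2))
    ([], [], [])
  let para := st.2.2 ++ [st.1]
  -- second loop: clean each paragraph into cleandpara
  let cleandpara := para.foldl
    (fun acc ob => acc ++ [ob.foldl (fun p w => p ++ [pvClean w]) []]) []
  -- third loop: clean newlist into nlist
  let nlist := st.2.1.foldl (fun n w => n ++ [pvClean w]) []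
  (nlist, cleandpara)

-- ===== PORT B =====
-- the 'while "\n" in lines: i = lines.index("\n"); chunks.append(lines[:i]); lines = lines[i+1:]'
-- loop; lines[:i] / lines[i+1:] are take/drop, exact here since i = lines.index("\n") ≥ 0
def pvSplitLoop (lines : List String) (chunks : List (List String)) : List (List String) :=
  match h : PySem.List.index? lines "\n" with
  | some i => pvSplitLoop (lines.drop (i + 1)) (chunks ++ [lines.take i])
  | none => chunks ++ [lines]
termination_by lines.length
decreasing_by
  have := (PySem.List.getElem_of_index?_eq_some h).1
  simp only [List.length_drop]; omega

def makeLists_alt (file_object : List String) : List String × List (List String) :=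
  let chunks := pvSplitLoop file_object []
  -- [[clean(w) for line in chunk for w in line.split()] for chunk in chunks]
  let cleandpara := chunks.map
    (fun chunk => chunk.flatMap (fun line => (PySem.Str.split₀ line).map pvClean))
  -- [w for p in cleandpara for w in p]
  let nlist := cleandpara.flatten
  (nlist, cleandpara)

-- ===== PRECONDITION & SPEC =====
def Spec_makeLists (file_object : List String) (out : List String × List (List String)) : Prop := out = makeLists_alt file_object
instance (file_object : List String) (out : List String × List (List String)) : Decidable (Spec_makeLists file_object out) := by unfold Spec_makeLists; infer_instance

-- ===== CLAIM =====
def Claim_equal_makeLists : Prop := ∀ (file_object : List String), Dom_makeLists file_object → Spec_makeLists file_object (makeLists file_object)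

-- ===== LEMMAS AND PROOFS =====

-- A's first-loop body, named for the proofs (definitionally the lambda in makeLists)
def pvStepA (st : List String × List String × List (List String)) (line : String) :
    List String × List String × List (List String) :=
  let paragraphs := st.1 ++ PySem.Str.split₀ line
  let newlist := st.2.1 ++ PySem.Str.split₀ line
  if line == "\n" then ([], newlist, st.2.2 ++ [paragraphs])
  else (paragraphs, newlist, st.2.2)

-- words of a raw chunk (proof-only abbreviation)
def pvW (c : List String) : List String := c.flatMap PySem.Str.split₀

theorem split0_newline : PySem.Str.split₀ "\n" = [] := by decide

theorem pvStepA_newline (st : List String × List String × List (List String)) :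
    pvStepA st "\n" = ([], st.2.1, st.2.2 ++ [st.1]) := by
  simp [pvStepA, split0_newline]

theorem pvStepA_ne (st : List String × List String × List (List String))
    (l : String) (hl : l ≠ "\n") :
    pvStepA st l = (st.1 ++ PySem.Str.split₀ l, st.2.1 ++ PySem.Str.split₀ l, st.2.2) := by
  simp [pvStepA, hl]

-- unfolding equations for pvSplitLoop
theorem pvSplitLoop_some (lines : List String) (acc : List (List String)) (i : Nat)
    (h : PySem.List.index? lines "\n" = some i) :
    pvSplitLoop lines acc = pvSplitLoop (lines.drop (i + 1)) (acc ++ [lines.take i]) := by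
  rw [pvSplitLoop]
  split
  · rename_i j heq
    rw [heq] at h
    injection h with h'
    subst h'
    rfl
  · rename_i heq
    rw [heq] at h
    cases h

theorem pvSplitLoop_none (lines : List String) (acc : List (List String))
    (h : PySem.List.index? lines "\n" = none) :
    pvSplitLoop lines acc = acc ++ [lines] := by
  rw [pvSplitLoop]
  split
  · rename_i j heq
    rw [heq] at h
    cases h
  · rfl

-- the chunks accumulator only prefixes the result
theorem splitLoop_acc (n : Nat) : ∀ (lines : List String), lines.length ≤ n →
    ∀ acc, pvSplitLoop lines acc = acc ++ pvSplitLoop lines [] := by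
  induction n with
  | zero =>
    intro lines hl acc
    have hnil : lines = [] := by cases lines <;> simp_all
    subst hnil
    have h0 : PySem.List.index? ([] : List String) "\n" = none := by
      rw [PySem.List.index?_eq_none_iff]; simp
    rw [pvSplitLoop_none _ _ h0, pvSplitLoop_none _ _ h0]
    simp
  | succ n ih =>
    intro lines hl acc
    cases h : PySem.List.index? lines "\n" with
    | none => rw [pvSplitLoop_none _ _ h, pvSplitLoop_none _ _ h]; simp
    | some i =>
      have hi := (PySem.List.getElem_of_index?_eq_some h).1
      have hlen : (lines.drop (i + 1)).length ≤ n := by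
        simp only [List.length_drop]; omega
      rw [pvSplitLoop_some _ _ _ h, pvSplitLoop_some _ _ _ h,
        ih _ hlen, ih _ hlen ([] ++ [lines.take i])]
      simp

theorem splitLoop_ne_nil (lines : List String) :
    ∃ c cs, pvSplitLoop lines [] = c :: cs := by
  cases h : PySem.List.index? lines "\n" with
  | none => exact ⟨lines, [], by rw [pvSplitLoop_none _ _ h]; rfl⟩
  | some i =>
    rw [pvSplitLoop_some _ _ _ h,
      splitLoop_acc (lines.drop (i + 1)).length _ le_rfl]
    exact ⟨lines.take i, _, rfl⟩

theorem splitLoop_cons_newline (rest : List String) :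
    pvSplitLoop ("\n" :: rest) [] = [] :: pvSplitLoop rest [] := by
  rw [pvSplitLoop_some _ _ 0 (PySem.List.index?_cons_self _ _)]
  simp only [List.drop_succ_cons, List.drop_zero, List.take_zero, List.nil_append]
  exact splitLoop_acc rest.length rest le_rfl [[]]

theorem splitLoop_cons_ne (l : String) (rest : List String) (hne : l ≠ "\n")
    (c : List String) (cs : List (List String)) (h : pvSplitLoop rest [] = c :: cs) :
    pvSplitLoop (l :: rest) [] = (l :: c) :: cs := by
  cases hr : PySem.List.index? rest "\n" with
  | none =>
    have hc : PySem.List.index? (l :: rest) "\n" = none := by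
      rw [PySem.List.index?_cons_of_ne _ hne, hr]; rfl
    rw [pvSplitLoop_none _ _ hr] at h
    simp only [List.nil_append] at h
    injection h with h1 h2
    rw [pvSplitLoop_none _ _ hc, ← h1, ← h2]
    rfl
  | some j =>
    have hc : PySem.List.index? (l :: rest) "\n" = some (j + 1) := by
      rw [PySem.List.index?_cons_of_ne _ hne, hr]; rfl
    rw [pvSplitLoop_some _ _ _ hr,
      splitLoop_acc (rest.drop (j + 1)).length _ le_rfl] at h
    simp only [List.nil_append] at h
    injection h with h1 h2
    rw [pvSplitLoop_some _ _ _ hc]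
    simp only [List.drop_succ_cons, List.take_succ_cons, List.nil_append]
    rw [splitLoop_acc (rest.drop (j + 1)).length _ le_rfl, ← h1, ← h2]
    simp

-- the words of the chunks, flattened, are the words of the file in order
theorem flat_chunks (fo : List String) :
    ((pvSplitLoop fo []).map pvW).flatten = fo.flatMap PySem.Str.split₀ := by
  induction fo with
  | nil =>
    have h0 : PySem.List.index? ([] : List String) "\n" = none := by
      rw [PySem.List.index?_eq_none_iff]; simp
    rw [pvSplitLoop_none _ _ h0]
    simp [pvW]
  | cons l rest ih =>
    by_cases hl : l = "\n"
    · subst hl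
      rw [splitLoop_cons_newline]
      simp [pvW, split0_newline, ih]
    · obtain ⟨c, cs, hc⟩ := splitLoop_ne_nil rest
      rw [splitLoop_cons_ne l rest hl c cs hc]
      rw [hc] at ih
      simp only [List.map_cons, List.flatten_cons, pvW, List.flatMap_cons] at ih ⊢
      simp [← ih]

-- A's first loop, characterised by B's chunk decomposition:
-- para-so-far ++ [current paragraph] = done ++ chunk words, newlist = all words
theorem loop1_inv (fo : List String) : ∀ (cur nl : List String)
    (done : List (List String)) (c : List String) (cs : List (List String)),
    pvSplitLoop fo [] = c :: cs →
    (fo.foldl pvStepA (cur, nl, done)).2.2 ++ [(fo.foldl pvStepA (cur, nl, done)).1]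
      = done ++ (cur ++ pvW c) :: cs.map pvW ∧
    (fo.foldl pvStepA (cur, nl, done)).2.1 = nl ++ fo.flatMap PySem.Str.split₀ := by
  induction fo with
  | nil =>
    intro cur nl done c cs hc
    have h0 : PySem.List.index? ([] : List String) "\n" = none := by
      rw [PySem.List.index?_eq_none_iff]; simp
    rw [pvSplitLoop_none _ _ h0] at hc
    simp only [List.nil_append] at hc
    injection hc with h1 h2
    simp [← h1, ← h2, pvW]
  | cons l rest ih =>
    intro cur nl done c cs hc
    obtain ⟨c', cs', hc'⟩ := splitLoop_ne_nil rest
    by_cases hl : l = "\n"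
    · subst hl
      rw [splitLoop_cons_newline, hc'] at hc
      injection hc with h1 h2
      subst h1; subst h2
      obtain ⟨ha, hb⟩ := ih [] nl (done ++ [cur]) c' cs' hc'
      simp only [List.foldl_cons, pvStepA_newline]
      refine ⟨?_, ?_⟩
      · rw [ha]; simp [pvW]
      · rw [hb]; simp [split0_newline]
    · rw [splitLoop_cons_ne l rest hl c' cs' hc'] at hc
      injection hc with h1 h2
      subst h2
      obtain ⟨ha, hb⟩ :=
        ih (cur ++ PySem.Str.split₀ l) (nl ++ PySem.Str.split₀ l) done c' cs' hc'
      simp only [List.foldl_cons, pvStepA_ne _ _ hl]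
      refine ⟨?_, ?_⟩
      · rw [ha, ← h1]; simp [pvW]
      · rw [hb]; simp

theorem makeLists_eq_alt (fo : List String) : makeLists fo = makeLists_alt fo := by
  obtain ⟨c, cs, hc⟩ := splitLoop_ne_nil fo
  obtain ⟨hpara, hnew⟩ := loop1_inv fo [] [] [] c cs hc
  have hflat := flat_chunks fo
  show ((fo.foldl pvStepA ([], [], [])).2.1.foldl (fun n w => n ++ [pvClean w]) [],
      ((fo.foldl pvStepA ([], [], [])).2.2 ++ [(fo.foldl pvStepA ([], [], [])).1]).foldl
        (fun acc ob => acc ++ [ob.foldl (fun p w => p ++ [pvClean w]) []]) []) = _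
  rw [hnew, hpara]
  unfold makeLists_alt
  rw [hc] at hflat ⊢
  simp only [PySem.List.foldl_append_singleton_eq_map, List.nil_append]
  rw [← hflat]
  simp only [Prod.mk.injEq]
  constructor
  · simp [pvW, Function.comp_def, List.map_flatMap, List.map_flatten]
  · simp [pvW, Function.comp_def, List.map_flatMap]

-- ===== VERDICT =====
theorem makeLists_spec : Claim_equal_makeLists := by
  intro fo _
  exact (makeLists_eq_alt fo).symm ▸ rfl
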